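-- pv_equiv track=rewrite | github.com/bobkatla/PythonTesting | FB/quali_round/A1_fb/A1_facebook.py | solution
-- ===== SOURCE A (Python) =====
-- def solution(arr):
--     results = []
--     for case in arr:
--         # prep the loop
--         max_vo, max_con, num_vo, num_con = 0, 0, 0, 0
--         ls_vo = ['A', 'E', 'I', 'O', 'U']
--         dict_vo = {}
--         dict_con = {}
--         for letter in case:
--             if letter in ls_vo:
--                 num_vo += 1
--                 if letter in dict_vo:
--                     dict_vo[letter] += 1
--                 else:
--                     dict_vo[letter] = 1
--                 if dict_vo[letter] > max_vo:
--                     max_vo = dict_vo[letter]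
--             else:
--                 num_con += 1
--                 if letter in dict_con:
--                     dict_con[letter] += 1
--                 else:
--                     dict_con[letter] = 1
--                 if dict_con[letter] > max_con:
--                     max_con = dict_con[letter]
--         # there are 2 cases, 1: turn to vo, 2: turn to con
--         case_1 = (num_vo - max_vo)*2 + num_con
--         case_2 = (num_con - max_con)*2 + num_vo
--         # calculate the result
--         re = 0
--         if num_vo == 0:
--             re = case_2 if case_2 < num_con else num_con
--         elif num_con == 0:
--             re = case_1 if case_1 < num_vo else num_vo
--         else:
--             re = case_1 if case_1 < case_2 else case_2
--         results.append(re)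
--     return results
-- ===== SOURCE B (Python) =====
-- def solution(arr):
--     vowels = 'AEIOU'
--     results = []
--     for case in arr:
--         # brute force over candidate target letters: cost of turning the whole
--         # string into the class of c with all same-class letters changed to c
--         # (same-class change costs 2, cross-class change costs 1, c itself 0).
--         candidates = set(case) | set(vowels) | {'b'}
--         results.append(min(
--             sum(0 if d == c else (2 if (d in vowels) == (c in vowels) else 1)
--                 for d in case)
--             for c in candidates
--         ))
--     return results
-- ===== Notes on version B (the rewrite author's own statement) =====
-- stated objective: alternative
-- what changed: B drops A's count-and-formula approach (two frequency dicts, running maxima, case_1/case_2 formulas and a three-way branch) and instead brute-forces over candidate target letters (the distinct letters of the string plus the five vowels and one consonant), computing for each candidate the literal conversion cost (0 for the letter itself, 2 for a same-class letter, 1 for a cross-class letter) and taking the minimum.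
import Mathlib
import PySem

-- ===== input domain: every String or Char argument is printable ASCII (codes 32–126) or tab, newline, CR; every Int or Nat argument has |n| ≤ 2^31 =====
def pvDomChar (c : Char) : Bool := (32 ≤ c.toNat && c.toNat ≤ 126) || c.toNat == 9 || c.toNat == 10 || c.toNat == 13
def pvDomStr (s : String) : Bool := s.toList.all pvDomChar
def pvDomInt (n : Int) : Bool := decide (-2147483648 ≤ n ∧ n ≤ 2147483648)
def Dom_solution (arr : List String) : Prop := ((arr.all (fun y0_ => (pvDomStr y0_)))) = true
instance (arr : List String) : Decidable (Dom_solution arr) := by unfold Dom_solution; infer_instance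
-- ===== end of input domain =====

-- B replaces A's count-and-formula scan with a brute-force minimisation over candidate
-- target letters, each scored by its literal per-character conversion cost (objective: alternative).

-- ===== PORT A =====
def solutionVowels : List Char := ['A', 'E', 'I', 'O', 'U']

structure AState where
  maxVo : Int
  maxCon : Int
  numVo : Int
  numCon : Int
  dvo : PySem.Dict Char Int
  dcon : PySem.Dict Char Int
deriving Repr

def solutionStep (s : AState) (letter : Char) : AState :=
  if solutionVowels.contains letter then
    let numVo := s.numVo + 1
    -- 'dict_vo[letter] += 1' / 'dict_vo[letter] = 1'
    let dvo := if s.dvo.contains letter then s.dvo.modify letter 0 (· + 1) else s.dvo.insert letter 1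
    -- 'if dict_vo[letter] > max_vo' (key always present, so getD is exact here)
    let maxVo := if dvo.getD letter 0 > s.maxVo then dvo.getD letter 0 else s.maxVo
    { s with numVo := numVo, dvo := dvo, maxVo := maxVo }
  else
    let numCon := s.numCon + 1
    let dcon := if s.dcon.contains letter then s.dcon.modify letter 0 (· + 1) else s.dcon.insert letter 1
    let maxCon := if dcon.getD letter 0 > s.maxCon then dcon.getD letter 0 else s.maxCon
    { s with numCon := numCon, dcon := dcon, maxCon := maxCon }

def solutionCase (case_ : String) : Int :=
  let st := case_.toList.foldl solutionStep ⟨0, 0, 0, 0, PySem.Dict.empty, PySem.Dict.empty⟩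
  let case1 := (st.numVo - st.maxVo) * 2 + st.numCon
  let case2 := (st.numCon - st.maxCon) * 2 + st.numVo
  if st.numVo == 0 then (if case2 < st.numCon then case2 else st.numCon)
  else if st.numCon == 0 then (if case1 < st.numVo then case1 else st.numVo)
  else (if case1 < case2 then case1 else case2)

def solution (arr : List String) : List Int :=
  arr.foldl (fun results case_ => results ++ [solutionCase case_]) []

-- ===== PORT B =====
def altVowels : List Char := "AEIOU".toList

-- 'sum(0 if d == c else (2 if (d in vowels) == (c in vowels) else 1) for d in case)'
def altCost (cs : List Char) (c : Char) : Int :=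
  cs.foldl (fun acc d =>
    acc + (if d = c then 0 else if (altVowels.contains d) = (altVowels.contains c) then 2 else 1)) 0

def altCase (case_ : String) : Int :=
  let cs := case_.toList
  -- 'set(case) | set(vowels) | {'b'}' (set iteration order is irrelevant: min of Ints)
  let candidates := PySem.Set.ofList (cs ++ altVowels ++ ['b'])
  -- builtin min over a nonempty collection (candidates always holds the five vowels)
  (PySem.List.min? (candidates.map (altCost cs)) (fun x => x)).getD 0

def solution_alt (arr : List String) : List Int :=
  arr.map altCase

-- ===== PRECONDITION & SPEC =====
def Spec_solution (arr : List String) (out : List Int) : Prop := out = solution_alt arr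
instance (arr : List String) (out : List Int) : Decidable (Spec_solution arr out) := by unfold Spec_solution; infer_instance

-- ===== CLAIM (what is proved, stated in full; the proofs are below) =====
def Claim_equal_solution : Prop := ∀ (arr : List String), Dom_solution arr → Spec_solution arr (solution arr)

-- ===== LEMMAS AND PROOFS =====

def vowP (c : Char) : Bool := solutionVowels.contains c

-- the largest multiplicity among the distinct elements of m (0 for m = [])
def maxCnt (m : List Char) : Int :=
  ((PySem.Set.ofList m).map (fun k => (m.count k : Int))).foldl max 0

theorem foldl_max_init (l : List Int) (a b : Int) :
    l.foldl max (max a b) = max (l.foldl max a) b := by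
  induction l generalizing a with
  | nil => rfl
  | cons x t ih =>
    simp only [List.foldl_cons]
    rw [show max (max a b) x = max (max a x) b by omega, ih]

theorem foldl_max_update (K : List Char) (g g' : Char → Int) (c : Char)
    (hnd : K.Nodup) (hc : c ∈ K) (h1 : g' c = g c + 1)
    (h2 : ∀ k, k ≠ c → g' k = g k) :
    ∀ a : Int, (K.map g').foldl max a = max ((K.map g).foldl max a) (g c + 1) := by
  induction K with
  | nil => cases hc
  | cons k K' ih =>
    intro a
    rcases List.nodup_cons.mp hnd with ⟨hk, hnd'⟩
    by_cases hkc : k = c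
    · subst hkc
      have hmaps : K'.map g' = K'.map g :=
        List.map_congr_left (fun x hx => h2 x (fun h => hk (h ▸ hx)))
      simp only [List.map_cons, List.foldl_cons, hmaps, h1]
      rw [foldl_max_init, foldl_max_init]
      omega
    · have hc' : c ∈ K' := by
        rcases List.mem_cons.mp hc with h | h
        · exact absurd h.symm hkc
        · exact h
      simp only [List.map_cons, List.foldl_cons, h2 k hkc]
      exact ih hnd' hc' (max a (g k))

theorem maxCnt_append (m : List Char) (c : Char) :
    maxCnt (m ++ [c]) = max (maxCnt m) ((m.count c : Int) + 1) := by
  unfold maxCnt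
  rw [PySem.Set.ofList_append_singleton]
  by_cases hc : c ∈ m
  · rw [PySem.Set.add_of_mem (by simpa [PySem.Set.mem_ofList] using hc)]
    have := foldl_max_update (PySem.Set.ofList m)
      (fun k => (m.count k : Int)) (fun k => ((m ++ [c]).count k : Int)) c
      (PySem.Set.nodup_ofList m) (by simpa [PySem.Set.mem_ofList] using hc)
      (by simp [List.count_append]) (fun k hk => by simp [List.count_append, List.count_singleton, Ne.symm hk]) 0
    simpa using this
  · rw [PySem.Set.add_of_not_mem (by simpa [PySem.Set.mem_ofList] using hc)]
    have hmaps : (PySem.Set.ofList m).map (fun k => ((m ++ [c]).count k : Int))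
        = (PySem.Set.ofList m).map (fun k => (m.count k : Int)) := by
      refine List.map_congr_left (fun x hx => ?_)
      have hxm : x ∈ m := (PySem.Set.mem_ofList _ _).mp hx
      have hxc : x ≠ c := fun h => hc (h ▸ hxm)
      simp [List.count_append, List.count_singleton, Ne.symm hxc]
    have hcnt0 : m.count c = 0 := List.count_eq_zero.mpr hc
    rw [List.map_append, List.foldl_append, hmaps]
    simp [List.count_append, hcnt0, foldl_max_init]

theorem if_gt_eq_max (a b : Int) : (if a > b then a else b) = max b a := by
  split_ifs <;> omega

-- characterisation of A's inner loop state after scanning l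
theorem solution_state (l : List Char) :
    (l.foldl solutionStep ⟨0, 0, 0, 0, PySem.Dict.empty, PySem.Dict.empty⟩).numVo
        = (l.countP vowP : Int) ∧
    (l.foldl solutionStep ⟨0, 0, 0, 0, PySem.Dict.empty, PySem.Dict.empty⟩).numCon
        = (l.countP (fun c => !vowP c) : Int) ∧
    (l.foldl solutionStep ⟨0, 0, 0, 0, PySem.Dict.empty, PySem.Dict.empty⟩).maxVo
        = maxCnt (l.filter vowP) ∧
    (l.foldl solutionStep ⟨0, 0, 0, 0, PySem.Dict.empty, PySem.Dict.empty⟩).maxCon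
        = maxCnt (l.filter (fun c => !vowP c)) ∧
    (∀ x, (l.foldl solutionStep ⟨0, 0, 0, 0, PySem.Dict.empty, PySem.Dict.empty⟩).dvo.getD x 0
        = ((l.filter vowP).count x : Int)) ∧
    (∀ x, (l.foldl solutionStep ⟨0, 0, 0, 0, PySem.Dict.empty, PySem.Dict.empty⟩).dcon.getD x 0
        = ((l.filter (fun c => !vowP c)).count x : Int)) := by
  induction l using List.reverseRecOn with
  | nil =>
    refine ⟨rfl, rfl, by decide, by decide, fun x => by simp [PySem.Dict.getD_empty], fun x => by simp [PySem.Dict.getD_empty]⟩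
  | append_singleton l c ih =>
    obtain ⟨h1, h2, h3, h4, h5, h6⟩ := ih
    rw [List.foldl_append] at *
    set st := l.foldl solutionStep ⟨0, 0, 0, 0, PySem.Dict.empty, PySem.Dict.empty⟩ with hst
    simp only [List.foldl_cons, List.foldl_nil]
    unfold solutionStep
    by_cases hv : vowP c
    · simp only [show solutionVowels.contains c = true from hv, if_true]
      have hdvo : ∀ x, (if st.dvo.contains c then st.dvo.modify c 0 (· + 1) else st.dvo.insert c 1).getD x 0
          = (((l.filter vowP).count x : Int) + if x = c then 1 else 0) := by
        intro x
        by_cases hc : st.dvo.contains c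
        · rw [if_pos hc, PySem.Dict.getD_modify]
          by_cases hxc : x = c <;> simp [hxc, h5]
        · have hz : ((l.filter vowP).count c : Int) = 0 := by
            rw [← h5 c, PySem.Dict.getD_of_not_contains st.dvo 0 (by simpa using hc)]
          rw [if_neg hc, PySem.Dict.getD_insert]
          by_cases hxc : x = c <;> simp [hxc, h5, hz]
      refine ⟨?_, ?_, ?_, ?_, ?_, ?_⟩
      · simp [List.countP_append, h1, List.countP_cons, hv]
      · simp [List.countP_append, h2, List.countP_cons, hv]
      · show (if _ > st.maxVo then _ else st.maxVo) = _
        rw [hdvo c, if_pos rfl, h3, List.filter_append,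
          show List.filter vowP [c] = [c] by simp [hv], maxCnt_append, if_gt_eq_max]
      · simpa [List.filter_append, hv] using h4
      · intro x
        rw [hdvo x]
        simp only [List.filter_append, show List.filter vowP [c] = [c] by simp [hv],
          List.count_append, List.count_singleton]
        by_cases hxc : x = c
        · simp [hxc]
        · simp [hxc, Ne.symm hxc]
      · intro x
        simpa [List.filter_append, hv] using h6 x
    · simp only [show solutionVowels.contains c = false by simpa [vowP] using hv, Bool.false_eq_true, if_false]
      have hdcon : ∀ x, (if st.dcon.contains c then st.dcon.modify c 0 (· + 1) else st.dcon.insert c 1).getD x 0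
          = (((l.filter (fun c => !vowP c)).count x : Int) + if x = c then 1 else 0) := by
        intro x
        by_cases hc : st.dcon.contains c
        · rw [if_pos hc, PySem.Dict.getD_modify]
          by_cases hxc : x = c <;> simp [hxc, h6]
        · have hz : ((l.filter (fun c => !vowP c)).count c : Int) = 0 := by
            rw [← h6 c, PySem.Dict.getD_of_not_contains st.dcon 0 (by simpa using hc)]
          rw [if_neg hc, PySem.Dict.getD_insert]
          by_cases hxc : x = c <;> simp [hxc, h6, hz]
      refine ⟨?_, ?_, ?_, ?_, ?_, ?_⟩
      · simp [List.countP_append, h1, List.countP_cons, hv]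
      · simp [List.countP_append, h2, List.countP_cons, hv]
      · simpa [List.filter_append, hv] using h3
      · show (if _ > st.maxCon then _ else st.maxCon) = _
        rw [hdcon c, if_pos rfl, h4, List.filter_append,
          show List.filter (fun c => !vowP c) [c] = [c] by simp [hv], maxCnt_append, if_gt_eq_max]
      · intro x
        simpa [List.filter_append, hv] using h5 x
      · intro x
        rw [hdcon x]
        simp only [List.filter_append, show List.filter (fun c => !vowP c) [c] = [c] by simp [hv],
          List.count_append, List.count_singleton]
        by_cases hxc : x = c
        · simp [hxc]
        · simp [hxc, Ne.symm hxc]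

-- ===== facts about maxCnt =====

theorem maxCnt_nonneg (m : List Char) : 0 ≤ maxCnt m := by
  unfold maxCnt
  exact (PySem.List.le_foldl_max _ 0).1

theorem count_le_maxCnt (m : List Char) (x : Char) : (m.count x : Int) ≤ maxCnt m := by
  by_cases hx : x ∈ m
  · unfold maxCnt
    exact (PySem.List.le_foldl_max _ 0).2 _
      (List.mem_map.mpr ⟨x, (PySem.Set.mem_ofList m x).mpr hx, rfl⟩)
  · rw [List.count_eq_zero.mpr hx]
    exact_mod_cast maxCnt_nonneg m

theorem maxCnt_attained (m : List Char) (hm : m ≠ []) :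
    ∃ k ∈ m, (m.count k : Int) = maxCnt m := by
  rcases PySem.List.foldl_max_mem ((PySem.Set.ofList m).map (fun k => (m.count k : Int))) 0 with h0 | hmem
  · exfalso
    obtain ⟨h, t, rfl⟩ := List.exists_cons_of_ne_nil hm
    have h1 : (1 : Int) ≤ ((h :: t).count h : Int) := by
      have := List.count_pos_iff.mpr (List.mem_cons_self (a := h) (l := t))
      exact_mod_cast this
    have h2 := count_le_maxCnt (h :: t) h
    unfold maxCnt at h2
    omega
  · obtain ⟨k, hk, hke⟩ := List.mem_map.mp hmem
    refine ⟨k, (PySem.Set.mem_ofList m k).mp hk, ?_⟩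
    unfold maxCnt
    exact hke

-- ===== B-side: closed form of the candidate cost =====

theorem altCost_val (cs : List Char) (c : Char) :
    altCost cs c = (if vowP c then 2 * (cs.countP vowP : Int) - 2 * (cs.count c : Int) + (cs.countP (fun d => !vowP d) : Int)
                    else 2 * (cs.countP (fun d => !vowP d) : Int) - 2 * (cs.count c : Int) + (cs.countP vowP : Int)) := by
  have hvv : altVowels = solutionVowels := by decide
  induction cs using List.reverseRecOn with
  | nil => simp [altCost]
  | append_singleton l d ih =>
    have hterm : altCost (l ++ [d]) c
        = altCost l c + (if d = c then 0 else if vowP d = vowP c then 2 else 1) := by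
      unfold altCost
      rw [List.foldl_append, List.foldl_cons, List.foldl_nil, hvv]
      rfl
    have e1 : ((l ++ [d]).countP vowP : Int) = (l.countP vowP : Int) + (if vowP d then 1 else 0) := by
      by_cases h : vowP d <;> simp [List.countP_append, h]
    have e2 : ((l ++ [d]).countP (fun x => !vowP x) : Int)
        = (l.countP (fun x => !vowP x) : Int) + (if vowP d then 0 else 1) := by
      by_cases h : vowP d <;> simp [List.countP_append, h]
    have e3 : ((l ++ [d]).count c : Int) = (l.count c : Int) + (if d = c then 1 else 0) := by
      by_cases h : d = c <;> simp [List.count_append, h, List.count_singleton]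
    rw [hterm, ih]
    by_cases hvc : vowP c <;> by_cases hvd : vowP d <;> by_cases hdc : d = c <;>
      simp_all <;> omega

-- per-string agreement of the two implementations
theorem case_eq (s : String) : solutionCase s = altCase s := by
  obtain ⟨h1, h2, h3, h4, -, -⟩ := solution_state s.toList
  set l := s.toList with hl
  set nv : Int := (l.countP vowP : Int) with hnv
  set nc : Int := (l.countP (fun c => !vowP c) : Int) with hnc
  set mv : Int := maxCnt (l.filter vowP) with hmv
  set mc : Int := maxCnt (l.filter (fun c => !vowP c)) with hmc
  set case1 : Int := (nv - mv) * 2 + nc with hcase1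
  set case2 : Int := (nc - mc) * 2 + nv with hcase2
  have hv0 : nv = 0 → mv = 0 := by
    intro h
    have hf : l.filter vowP = [] := by
      have : l.countP vowP = 0 := by omega
      rwa [List.countP_eq_length_filter, List.length_eq_zero_iff] at this
    rw [hmv, hf]; decide
  have hc0 : nc = 0 → mc = 0 := by
    intro h
    have hf : l.filter (fun c => !vowP c) = [] := by
      have : l.countP (fun c => !vowP c) = 0 := by omega
      rwa [List.countP_eq_length_filter, List.length_eq_zero_iff] at this
    rw [hmc, hf]; decide
  -- counts of a vowel / consonant live inside the corresponding filter
  have hcntv : ∀ c, vowP c → (l.count c : Int) = ((l.filter vowP).count c : Int) := by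
    intro c hc; rw [List.count_filter hc]
  have hcntc : ∀ c, ¬ vowP c → (l.count c : Int) = ((l.filter (fun d => !vowP d)).count c : Int) := by
    intro c hc; rw [List.count_filter (by simp [hc])]
  -- A's branches all compute min case1 case2
  have hA : solutionCase s = min case1 case2 := by
    simp only [solutionCase, ← hl, h1, h2, h3, h4, ← hnv, ← hnc, ← hmv, ← hmc,
      ← hcase1, ← hcase2, beq_iff_eq]
    by_cases hz1 : nv = 0
    · have := hv0 hz1; split_ifs <;> omega
    · by_cases hz2 : nc = 0
      · have := hc0 hz2; split_ifs <;> omega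
      · split_ifs <;> omega
  -- B's candidate minimum also computes min case1 case2
  have hvA : vowP 'A' = true := by decide
  have hvb : vowP 'b' = false := by decide
  set big : List Char := l ++ altVowels ++ ['b'] with hbig
  set L : List Int := (PySem.Set.ofList big).map (altCost l) with hL
  have hvle : ∀ x ∈ L, min case1 case2 ≤ x := by
    intro x hx
    obtain ⟨c, hc, rfl⟩ := List.mem_map.mp hx
    rw [altCost_val]
    by_cases hvc : vowP c
    · have hcnt : (l.count c : Int) ≤ mv := by
        rw [hcntv c hvc, hmv]; exact count_le_maxCnt _ _
      rw [if_pos hvc]; omega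
    · have hcnt : (l.count c : Int) ≤ mc := by
        rw [hcntc c hvc, hmc]; exact count_le_maxCnt _ _
      rw [if_neg hvc]; omega
  have hvmem : min case1 case2 ∈ L := by
    rcases le_total case1 case2 with hle | hle
    · rw [min_eq_left hle]
      by_cases hf : l.filter vowP = []
      · refine List.mem_map.mpr ⟨'A', (PySem.Set.mem_ofList _ _).mpr (by simp [hbig, altVowels]), ?_⟩
        have hm0 : mv = 0 := by rw [hmv, hf]; decide
        have hcnt : (l.count 'A' : Int) = 0 := by rw [hcntv 'A' hvA, hf]; simp
        rw [altCost_val, if_pos hvA]; omega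
      · obtain ⟨k, hk, hke⟩ := maxCnt_attained _ hf
        have hkv : vowP k = true := List.of_mem_filter hk
        have hkl : k ∈ l := List.mem_of_mem_filter hk
        refine List.mem_map.mpr ⟨k, (PySem.Set.mem_ofList _ _).mpr (by simp [hbig, hkl]), ?_⟩
        have hcnt : (l.count k : Int) = mv := by rw [hcntv k hkv, hmv]; exact hke
        rw [altCost_val, if_pos hkv]; omega
    · rw [min_eq_right hle]
      by_cases hf : l.filter (fun c => !vowP c) = []
      · refine List.mem_map.mpr ⟨'b', (PySem.Set.mem_ofList _ _).mpr (by simp [hbig]), ?_⟩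
        have hm0 : mc = 0 := by rw [hmc, hf]; decide
        have hcnt : (l.count 'b' : Int) = 0 := by
          rw [hcntc 'b' (by simp [hvb]), hf]; simp
        rw [altCost_val, if_neg (by simp [hvb])]; omega
      · obtain ⟨k, hk, hke⟩ := maxCnt_attained _ hf
        have hkc : vowP k = false := by
          have := List.of_mem_filter hk; simpa using this
        have hkl : k ∈ l := List.mem_of_mem_filter hk
        refine List.mem_map.mpr ⟨k, (PySem.Set.mem_ofList _ _).mpr (by simp [hbig, hkl]), ?_⟩
        have hcnt : (l.count k : Int) = mc := by
          rw [hcntc k (by simp [hkc]), hmc]; exact hke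
        rw [altCost_val, if_neg (by simp [hkc])]; omega
  have hB : altCase s = min case1 case2 := by
    simp only [altCase, ← hl, ← hbig, ← hL]
    cases h : PySem.List.min? L (fun x => x) with
    | none =>
      exfalso
      rw [PySem.List.min?_eq_none_iff] at h
      rw [h] at hvmem
      exact List.not_mem_nil hvmem
    | some m =>
      have hmm : m ∈ L := PySem.List.min?_mem h
      have hmin := PySem.List.min?_isMin h _ hvmem
      have := hvle m hmm
      simp only [Option.getD_some]
      omega
  rw [hA, hB]

-- ===== VERDICT (by name: the statement is the Claim_ definition above) =====
theorem solution_spec : Claim_equal_solution := by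
  intro arr _
  unfold Spec_solution solution solution_alt
  rw [PySem.List.foldl_append_singleton_eq_map]
  simp only [List.nil_append]
  exact List.map_congr_left (fun s _ => case_eq s)
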